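-- pv_equiv track=rewrite | github.com/spartakillx/cmse830_fds | app.py | canonical_name_key
-- ===== SOURCE A (Python) =====
-- def canonical_name_key(name: str) -> str:
--     if not isinstance(name, str):
--         return ""
--     s = name.strip().lower()
--     s = "".join(ch for ch in s if ch.isalpha() or ch.isspace())
--     tokens = [t for t in s.split() if t]
--     suffixes = {"jr", "sr", "ii", "iii", "iv", "v"}
--     tokens = [t for t in tokens if t not in suffixes]
--     if not tokens:
--         return ""
--     if len(tokens) == 1:
--         return tokens[0]
--     return f"{tokens[0]} {tokens[-1]}"
-- ===== SOURCE B (Python) =====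
-- def canonical_name_key(name: str) -> str:
--     if not isinstance(name, str):
--         return ""
--     suffixes = {"jr", "sr", "ii", "iii", "iv", "v"}
--     first = None
--     last = ""
--     count = 0
--     cur = ""
--     for ch in name.strip().lower() + " ":
--         if ch.isspace():
--             if cur and cur not in suffixes:
--                 if first is None:
--                     first = cur
--                 last = cur
--                 count += 1
--             cur = ""
--         elif ch.isalpha():
--             cur += ch
--     if count == 0:
--         return ""
--     if count == 1:
--         return first
--     return f"{first} {last}"
-- ===== Notes on version B (the rewrite author's own statement) =====
-- stated objective: alternative
-- what changed: Replaces A's four-stage pipeline (char filter, join, split, two list filters, end indexing) with a single character scan that buffers the current token and maintains first/last/count on the fly.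
import Mathlib
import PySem

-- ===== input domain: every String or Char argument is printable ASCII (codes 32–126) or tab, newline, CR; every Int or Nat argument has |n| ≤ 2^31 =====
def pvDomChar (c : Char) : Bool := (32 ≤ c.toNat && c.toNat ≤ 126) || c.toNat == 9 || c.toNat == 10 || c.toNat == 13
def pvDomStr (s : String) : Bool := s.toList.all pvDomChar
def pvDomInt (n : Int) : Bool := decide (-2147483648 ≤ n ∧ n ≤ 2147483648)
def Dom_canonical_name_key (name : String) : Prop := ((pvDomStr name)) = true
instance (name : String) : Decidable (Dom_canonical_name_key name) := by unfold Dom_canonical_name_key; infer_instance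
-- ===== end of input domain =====

-- B replaces A's filter/join/split/filter pipeline by a single character scan keeping first/last/count; alternative decomposition, same cost.


-- ===== PORT A =====
def pvSuffixesA : PySem.Set (List Char) :=
  PySem.Set.ofList ["jr".toList, "sr".toList, "ii".toList, "iii".toList, "iv".toList, "v".toList]

def canonical_name_key (name : String) : String :=
  let s := PySem.Str.lower (PySem.Str.strip name)
  -- "".join(ch for ch in s if ch.isalpha() or ch.isspace()) : filtered char list
  let s2 := s.toList.filter (fun ch => PySem.Chars.isalpha ch || PySem.Chars.isspace ch)
  let tokens := (PySem.Chars.split₀ s2).filter (fun t => !t.isEmpty)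
  let tokens2 := tokens.filter (fun t => !(PySem.Set.contains pvSuffixesA t))
  if tokens2.isEmpty then ""
  else if tokens2.length = 1 then String.mk ((PySem.List.pyGet? tokens2 0).getD [])
  else String.mk (((PySem.List.pyGet? tokens2 0).getD []) ++ [' '] ++ ((PySem.List.pyGet? tokens2 (-1)).getD []))

-- ===== PORT B =====
def pvSuffixesB : PySem.Set (List Char) :=
  PySem.Set.ofList ["jr".toList, "sr".toList, "ii".toList, "iii".toList, "iv".toList, "v".toList]

-- one scan step: state = ((first?, last, count), cur)
def pvStep (st : (Option (List Char) × List Char × Int) × List Char) (ch : Char) :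
    (Option (List Char) × List Char × Int) × List Char :=
  let ((first, last, count), cur) := st
  if PySem.Chars.isspace ch then
    if !cur.isEmpty && !(PySem.Set.contains pvSuffixesB cur) then
      ((if first.isNone then some cur else first, cur, count + 1), [])
    else ((first, last, count), [])
  else if PySem.Chars.isalpha ch then ((first, last, count), cur ++ [ch])
  else st

def canonical_name_key_alt (name : String) : String :=
  let ((first, last, count), _) :=
    ((PySem.Str.lower (PySem.Str.strip name)).toList ++ [' ']).foldl pvStep ((none, [], 0), [])
  if count == 0 then ""
  else if count == 1 then String.mk (first.getD [])
  else String.mk (first.getD [] ++ [' '] ++ last)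

-- ===== PRECONDITION & SPEC =====
def Spec_canonical_name_key (name : String) (out : String) : Prop := out = canonical_name_key_alt name
instance (name : String) (out : String) : Decidable (Spec_canonical_name_key name out) := by unfold Spec_canonical_name_key; infer_instance

-- ===== CLAIM (what is proved, stated in full; the proofs are below) =====
def Claim_equal_canonical_name_key : Prop := ∀ (name : String), Dom_canonical_name_key name → Spec_canonical_name_key name (canonical_name_key name)

-- ===== LEMMAS AND PROOFS =====

-- the char classes kept by A's filter
def pvPred (c : Char) : Bool := PySem.Chars.isalpha c || PySem.Chars.isspace c

-- token-level summary step matching pvStep's finalize action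
def pvEmit (st : Option (List Char) × List Char × Int) (t : List Char) :
    Option (List Char) × List Char × Int :=
  if !t.isEmpty && !(PySem.Set.contains pvSuffixesB t) then
    ((if st.1.isNone then some t else st.1), t, st.2.2 + 1)
  else st

theorem pvStep_skip (st : (Option (List Char) × List Char × Int) × List Char) (c : Char)
    (h : pvPred c = false) : pvStep st c = st := by
  obtain ⟨⟨f, l, k⟩, b⟩ := st
  simp [pvPred, Bool.or_eq_false_iff] at h
  simp [pvStep, h.1, h.2]

theorem pvFold_filter (s : List Char) (st : (Option (List Char) × List Char × Int) × List Char) :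
    s.foldl pvStep st = (s.filter pvPred).foldl pvStep st := by
  induction s generalizing st with
  | nil => rfl
  | cons c rest ih =>
    by_cases h : pvPred c = true
    · simp [List.filter_cons, h, List.foldl_cons, ih]
    · simp only [Bool.not_eq_true] at h
      simp [List.filter_cons, h, List.foldl_cons, pvStep_skip _ _ h, ih]

theorem pvGo_acc (s : List Char) (cur : List Char) (acc : List (List Char)) :
    PySem.Chars.split₀.go s cur acc = acc.reverse ++ PySem.Chars.split₀.go s cur [] := by
  induction s generalizing cur acc with
  | nil =>
    by_cases h : cur.isEmpty <;> simp [PySem.Chars.split₀.go, h]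
  | cons c rest ih =>
    by_cases hs : PySem.Chars.isspace c = true
    · by_cases h : cur.isEmpty = true
      · simp only [PySem.Chars.split₀.go, hs, h, if_true]
        rw [ih]
      · simp only [Bool.not_eq_true] at h
        simp only [PySem.Chars.split₀.go, hs, h, if_true, Bool.false_eq_true, if_false]
        rw [ih [] (cur.reverse :: acc), ih [] [cur.reverse]]
        simp
    · simp only [Bool.not_eq_true] at hs
      simp only [PySem.Chars.split₀.go, hs, Bool.false_eq_true, if_false]
      rw [ih, ih (c :: cur) []]

theorem pvMain (s : List Char) (hp : ∀ c ∈ s, pvPred c = true)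
    (st : Option (List Char) × List Char × Int) (b : List Char) :
    (s ++ [' ']).foldl pvStep (st, b) =
      ((PySem.Chars.split₀.go s b.reverse []).foldl pvEmit st, []) := by
  induction s generalizing st b with
  | nil =>
    obtain ⟨f, l, k⟩ := st
    by_cases h : b.isEmpty
    · simp at h
      simp [pvStep, PySem.Chars.split₀.go, h, PySem.Chars.isspace]
    · simp at h
      have hr : b.reverse.isEmpty = false := by simp [h]
      simp [pvStep, PySem.Chars.split₀.go, hr, PySem.Chars.isspace, pvEmit, h]
      split <;> rfl
  | cons c rest ih =>
    have hc : pvPred c = true := hp c (List.mem_cons_self ..)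
    have hrest : ∀ x ∈ rest, pvPred x = true := fun x hx => hp x (List.mem_cons_of_mem _ hx)
    obtain ⟨f, l, k⟩ := st
    by_cases hs : PySem.Chars.isspace c = true
    · simp only [List.cons_append, List.foldl_cons]
      by_cases h : b.isEmpty
      · simp at h
        simp only [pvStep, hs, if_true, h, List.isEmpty_nil, Bool.not_true, Bool.false_and,
          Bool.false_eq_true, if_false]
        rw [ih hrest]
        simp [PySem.Chars.split₀.go, hs, h]
      · simp at h
        have hr : b.reverse.isEmpty = false := by simp [h]
        have hgo : PySem.Chars.split₀.go (c :: rest) b.reverse [] =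
            b :: PySem.Chars.split₀.go rest [] [] := by
          simp only [PySem.Chars.split₀.go, hs, hr, Bool.false_eq_true, if_false, if_true]
          rw [pvGo_acc]; simp
        rw [hgo]
        have hfin : pvStep ((f, l, k), b) c = (pvEmit (f, l, k) b, []) := by
          simp only [pvStep, pvEmit, hs, if_true]
          split <;> rfl
        simp only [hfin]
        rw [ih hrest]
        simp
    · have ha : PySem.Chars.isalpha c = true := by
        simp only [Bool.not_eq_true] at hs
        simpa [pvPred, hs] using hc
      simp only [Bool.not_eq_true] at hs
      simp only [List.cons_append, List.foldl_cons, pvStep, hs, Bool.false_eq_true, if_false,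
        ha, if_true]
      rw [ih hrest]
      simp [PySem.Chars.split₀.go, hs]

-- good t : t survives A's two filters / B's finalize condition
def pvGood (t : List Char) : Bool := !t.isEmpty && !(PySem.Set.contains pvSuffixesB t)

theorem pvEmit_pos (st : Option (List Char) × List Char × Int) (t : List Char)
    (h : pvGood t = true) :
    pvEmit st t = ((if st.1.isNone then some t else st.1), t, st.2.2 + 1) := by
  unfold pvEmit
  exact if_pos h

theorem pvEmit_neg (st : Option (List Char) × List Char × Int) (t : List Char)
    (h : pvGood t = false) :
    pvEmit st t = st := by
  unfold pvEmit
  refine if_neg ?_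
  intro hc
  rw [show ((!t.isEmpty && !(PySem.Set.contains pvSuffixesB t)) = true) = (pvGood t = true) from rfl] at hc
  rw [h] at hc
  exact Bool.false_ne_true hc

theorem pvEmit_filter (ts : List (List Char)) (st : Option (List Char) × List Char × Int) :
    ts.foldl pvEmit st = (ts.filter pvGood).foldl pvEmit st := by
  induction ts generalizing st with
  | nil => rfl
  | cons t rest ih =>
    by_cases h : pvGood t = true
    · simp only [List.filter_cons, h, if_true, List.foldl_cons]
      exact ih _
    · simp only [Bool.not_eq_true] at h
      simp only [List.filter_cons, h, Bool.false_eq_true, if_false, List.foldl_cons,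
        pvEmit_neg st t h]
      exact ih st

theorem pvAgg_some (ts : List (List Char)) (f0 l0 : List Char) (c0 : Int) :
    ts.foldl pvEmit (some f0, l0, c0) =
      (some f0, ts.foldl (fun acc t => if pvGood t then t else acc) l0,
        c0 + ((ts.filter pvGood).length : Int)) := by
  induction ts generalizing l0 c0 with
  | nil => simp
  | cons t rest ih =>
    by_cases h : pvGood t = true
    · simp only [List.foldl_cons, pvEmit_pos _ _ h, Option.isNone_some, Bool.false_eq_true,
        if_false, List.filter_cons, h, if_true]
      rw [ih]
      simp only [List.length_cons, Prod.mk.injEq, true_and]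
      push_cast
      ring
    · simp only [Bool.not_eq_true] at h
      simp only [List.foldl_cons, pvEmit_neg _ _ h, List.filter_cons, h, Bool.false_eq_true,
        if_false]
      exact ih l0 c0

theorem pvAgg (ts : List (List Char)) (hg : ∀ t ∈ ts, pvGood t = true) :
    ts.foldl pvEmit (none, [], 0) = (ts.head?, ts.getLastD [], (ts.length : Int)) := by
  cases ts with
  | nil => rfl
  | cons t rest =>
    have ht := hg t (List.mem_cons_self ..)
    have hrest : ∀ x ∈ rest, pvGood x = true := fun x hx => hg x (List.mem_cons_of_mem _ hx)
    simp only [List.foldl_cons, pvEmit_pos _ _ ht, Option.isNone_none, if_true]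
    rw [pvAgg_some]
    have hfilt : rest.filter pvGood = rest := List.filter_eq_self.mpr (by
      intro x hx; exact hrest x hx)
    have hfold : ∀ (rest' : List (List Char)), (∀ x ∈ rest', pvGood x = true) →
        ∀ t0, rest'.foldl (fun acc t => if pvGood t then t else acc) t0 = rest'.getLastD t0 := by
      intro rest'
      induction rest' with
      | nil => intro _ t0; rfl
      | cons u rs ihr =>
        intro hall t0
        have hu := hall u (List.mem_cons_self ..)
        have hrs : ∀ x ∈ rs, pvGood x = true := fun x hx => hall x (List.mem_cons_of_mem _ hx)
        simp only [List.foldl_cons, hu, if_true, List.getLastD_cons]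
        exact ihr hrs u
    rw [hfilt, hfold rest hrest t]
    simp only [List.head?_cons, List.getLastD_cons, List.length_cons, Prod.mk.injEq, true_and]
    push_cast
    ring

theorem pvEq_core (l : List Char) :
    (if (((PySem.Chars.split₀ (l.filter pvPred)).filter (fun t => !t.isEmpty)).filter
          (fun t => !(PySem.Set.contains pvSuffixesA t))).isEmpty then ""
     else if (((PySem.Chars.split₀ (l.filter pvPred)).filter (fun t => !t.isEmpty)).filter
          (fun t => !(PySem.Set.contains pvSuffixesA t))).length = 1 then
       String.mk ((PySem.List.pyGet? (((PySem.Chars.split₀ (l.filter pvPred)).filter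
          (fun t => !t.isEmpty)).filter (fun t => !(PySem.Set.contains pvSuffixesA t))) 0).getD [])
     else
       String.mk (((PySem.List.pyGet? (((PySem.Chars.split₀ (l.filter pvPred)).filter
          (fun t => !t.isEmpty)).filter (fun t => !(PySem.Set.contains pvSuffixesA t))) 0).getD [])
         ++ [' '] ++
         ((PySem.List.pyGet? (((PySem.Chars.split₀ (l.filter pvPred)).filter
          (fun t => !t.isEmpty)).filter (fun t => !(PySem.Set.contains pvSuffixesA t))) (-1)).getD []))) =
    (match (l ++ [' ']).foldl pvStep ((none, [], 0), []) with
     | ((first, last, count), _) =>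
       if count == 0 then ""
       else if count == 1 then String.mk (first.getD [])
       else String.mk (first.getD [] ++ [' '] ++ last)) := by
  have hts2 : ((PySem.Chars.split₀ (l.filter pvPred)).filter (fun t => !t.isEmpty)).filter
      (fun t => !(PySem.Set.contains pvSuffixesA t)) =
      (PySem.Chars.split₀ (l.filter pvPred)).filter pvGood := by
    rw [List.filter_filter]
    refine List.filter_congr ?_
    intro t _
    exact Bool.and_comm _ _
  have hfold : (l ++ [' ']).foldl pvStep ((none, [], 0), []) =
      ((((PySem.Chars.split₀ (l.filter pvPred)).filter pvGood).head?,
        ((PySem.Chars.split₀ (l.filter pvPred)).filter pvGood).getLastD [],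
        ((((PySem.Chars.split₀ (l.filter pvPred)).filter pvGood).length : Int))), []) := by
    rw [pvFold_filter]
    rw [show (l ++ [' ']).filter pvPred = l.filter pvPred ++ [' '] from by
      rw [List.filter_append]; rfl]
    rw [pvMain (l.filter pvPred) (fun c hc => (List.mem_filter.mp hc).2) (none, [], 0) []]
    rw [show (([] : List Char)).reverse = [] from rfl]
    rw [show PySem.Chars.split₀.go (l.filter pvPred) [] [] =
        PySem.Chars.split₀ (l.filter pvPred) from rfl]
    rw [pvEmit_filter]
    rw [pvAgg _ (fun t ht => (List.mem_filter.mp ht).2)]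
  rw [hts2, hfold]
  generalize (PySem.Chars.split₀ (l.filter pvPred)).filter pvGood = ts2
  cases ts2 with
  | nil => simp
  | cons t rest =>
    cases rest with
    | nil => simp [PySem.List.pyGet?, PySem.List.pyIdx?]
    | cons u rs =>
      have hne1 : (t :: u :: rs).length ≠ 1 := by simp
      have hbne0 : ((((t :: u :: rs).length : Nat) : Int) == 0) = false :=
        beq_eq_false_iff_ne.mpr (by simp only [List.length_cons]; push_cast; omega)
      have hbne1 : ((((t :: u :: rs).length : Nat) : Int) == 1) = false :=
        beq_eq_false_iff_ne.mpr (by simp only [List.length_cons]; push_cast; omega)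
      simp only [List.isEmpty_cons, Bool.false_eq_true, if_false, hne1, hbne0, hbne1,
        List.head?_cons, Option.getD_some, List.getLastD_cons]
      rw [PySem.List.pyGet?_neg_one, List.getLast?_cons_cons, List.getLast?_cons]
      have h1 : (0 : Int) < (((t :: u :: rs).length : Nat) : Int) := by
        simp only [List.length_cons]; push_cast; omega
      have h0 : (0 : Int) ≤ (rs.length : Int) + 1 := by positivity
      simp [PySem.List.pyGet?, PySem.List.pyIdx?, List.getLastD_eq_getLast?, h0]

theorem canonical_name_key_eq (name : String) :
    canonical_name_key name = canonical_name_key_alt name := by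
  unfold canonical_name_key canonical_name_key_alt
  exact pvEq_core ((PySem.Str.lower (PySem.Str.strip name)).toList)

-- ===== VERDICT (by name: the statement is the Claim_ definition above) =====
theorem canonical_name_key_spec : Claim_equal_canonical_name_key := by
  intro name _
  unfold Spec_canonical_name_key
  exact canonical_name_key_eq name
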